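-- pv_equiv track=rewrite | github.com/0xntlong/leetcode-and-self-study | python3/medium-solution/3583.py | specialTriplets
-- ===== SOURCE A (Python) =====
-- from typing import List
--
-- def specialTriplets(nums: List[int]) -> int:
--     dict1 = {}
--     dict2 = {}
--     res = 0
--     mod = 10**9 + 7
--     for num in nums:
--         if num % 2 == 0 and num // 2 in dict2:
--             res += dict2[num // 2]
--             res %= mod
--         if num * 2 in dict1:
--             if num in dict2:
--                 dict2[num] += dict1[num * 2]
--             else:
--                 dict2[num] = dict1[num * 2]
--
--         if num in dict1:
--             dict1[num] += 1
--         else: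
--             dict1[num] = 1
--     return res
-- ===== SOURCE B (Python) =====
-- from typing import List
--
-- def specialTriplets(nums: List[int]) -> int:
--     mod = 10**9 + 7
--     right = {}
--     for num in nums:
--         right[num] = right.get(num, 0) + 1
--     left = {}
--     res = 0
--     for num in nums:
--         right[num] -= 1
--         res = (res + left.get(2 * num, 0) * right.get(2 * num, 0)) % mod
--         left[num] = left.get(num, 0) + 1
--     return res
-- ===== Notes on version B (the rewrite author's own statement) =====
-- stated objective: alternative
-- what changed: B replaces A's chained prefix-pair accumulation (dict2 carrying pair counts forward to the third element) with a pivot split: a full frequency dict of the array is decremented while sweeping, and each middle element j contributes left[2*nums[j]] * right[2*nums[j]].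
import Mathlib
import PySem

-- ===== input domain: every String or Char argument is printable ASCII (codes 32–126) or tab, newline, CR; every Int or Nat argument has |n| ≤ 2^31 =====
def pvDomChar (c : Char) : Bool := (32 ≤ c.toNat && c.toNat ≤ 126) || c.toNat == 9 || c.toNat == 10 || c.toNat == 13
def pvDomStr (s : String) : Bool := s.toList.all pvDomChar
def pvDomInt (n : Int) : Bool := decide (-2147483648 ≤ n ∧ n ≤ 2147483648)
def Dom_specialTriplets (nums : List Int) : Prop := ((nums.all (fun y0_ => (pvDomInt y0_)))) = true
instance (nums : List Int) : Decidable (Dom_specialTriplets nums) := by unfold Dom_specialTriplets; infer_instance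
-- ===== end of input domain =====

-- B counts each middle element's contribution as left[2x] * right[2x] from a decremented full-frequency
-- dict, instead of A's forward accumulation of pair counts (dict2) consumed at the third element;
-- an alternative decomposition of the same count, same cost.

-- ===== PORT A =====
def specialTripletsStepA (st : PySem.Dict Int Int × PySem.Dict Int Int × Int) (num : Int) :
    PySem.Dict Int Int × PySem.Dict Int Int × Int :=
  let d1 := st.1
  let d2 := st.2.1
  let res := st.2.2
  let res :=
    if PySem.Int.mod num 2 = 0 ∧ d2.contains (PySem.Int.floordiv num 2) = true then
      PySem.Int.mod (res + d2.getD (PySem.Int.floordiv num 2) 0) (10 ^ 9 + 7)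
    else res
  let d2 :=
    if d1.contains (num * 2) then
      (if d2.contains num then d2.insert num (d2.getD num 0 + d1.getD (num * 2) 0)
       else d2.insert num (d1.getD (num * 2) 0))
    else d2
  let d1 :=
    if d1.contains num then d1.insert num (d1.getD num 0 + 1)
    else d1.insert num 1
  (d1, d2, res)

def specialTriplets (nums : List Int) : Int :=
  (nums.foldl specialTripletsStepA (PySem.Dict.empty, PySem.Dict.empty, 0)).2.2

-- ===== PORT B =====
def specialTripletsStepB (st : PySem.Dict Int Int × PySem.Dict Int Int × Int) (num : Int) :
    PySem.Dict Int Int × PySem.Dict Int Int × Int :=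
  let left := st.1
  let right := st.2.1
  let res := st.2.2
  let right := right.insert num (right.getD num 0 - 1)
  let res := PySem.Int.mod (res + left.getD (2 * num) 0 * right.getD (2 * num) 0) (10 ^ 9 + 7)
  let left := left.insert num (left.getD num 0 + 1)
  (left, right, res)

def specialTriplets_alt (nums : List Int) : Int :=
  let right := nums.foldl (fun d num => d.insert num (d.getD num 0 + 1)) PySem.Dict.empty
  (nums.foldl specialTripletsStepB (PySem.Dict.empty, right, 0)).2.2

-- ===== PRECONDITION & SPEC =====
def Spec_specialTriplets (nums : List Int) (out : Int) : Prop := out = specialTriplets_alt nums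
instance (nums : List Int) (out : Int) : Decidable (Spec_specialTriplets nums out) := by unfold Spec_specialTriplets; infer_instance

-- ===== CLAIM (what is proved, stated in full; the proofs are below) =====
def Claim_equal_specialTriplets : Prop := ∀ (nums : List Int), Dom_specialTriplets nums → Spec_specialTriplets nums (specialTriplets nums)

-- ===== LEMMAS AND PROOFS =====

-- number of pairs i < j in l with l[i] = 2*y and l[j] = y
def pairsI : List Int → Int → Int
  | [], _ => 0
  | a :: t, y => (if a = 2 * y then (t.count y : Int) else 0) + pairsI t y

-- A's per-element contribution at the third element x (= dict2[x // 2] when x is even)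
def contribA (p : List Int) (x : Int) : Int :=
  if PySem.Int.mod x 2 = 0 then pairsI p (PySem.Int.floordiv x 2) else 0

-- A's total: sum over third elements x in s of the pair count in the prefix
def aSum : List Int → List Int → Int
  | _, [] => 0
  | p, x :: s => contribA p x + aSum (p ++ [x]) s

-- B's total: sum over middle elements x in s of left-count * right-count
def midSum : List Int → List Int → Int
  | _, [] => 0
  | p, x :: s => (p.count (2 * x) : Int) * (s.count (2 * x) : Int) + midSum (p ++ [x]) s

-- triplets whose pair (i, j) lies in the fixed prefix p and third element in s
def eSum : List Int → List Int → Int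
  | _, [] => 0
  | p, x :: s => contribA p x + eSum p s

lemma count_append_singleton (p : List Int) (x v : Int) :
    (p ++ [x]).count v = p.count v + (if v = x then 1 else 0) := by
  simp only [List.count_append, List.count_singleton, beq_iff_eq]
  by_cases h : v = x
  · subst h; simp
  · have h' : ¬ x = v := fun hh => h hh.symm
    simp [h, h']

lemma pairsI_nonneg (l : List Int) (y : Int) : 0 ≤ pairsI l y := by
  induction l with
  | nil => simp [pairsI]
  | cons a t ih =>
    simp only [pairsI]
    have : (0:Int) ≤ (t.count y : Int) := by positivity
    split_ifs <;> omega

lemma pairsI_append (p : List Int) (x y : Int) :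
    pairsI (p ++ [x]) y = pairsI p y + (if x = y then (p.count (2 * y) : Int) else 0) := by
  induction p with
  | nil => simp [pairsI]
  | cons a t ih =>
    simp only [List.cons_append, pairsI, ih, List.count_append, List.count_singleton]
    split_ifs <;> simp_all <;> try ring

lemma contribA_append (p : List Int) (x z : Int) :
    contribA (p ++ [x]) z = contribA p z + (if z = 2 * x then (p.count (2 * x) : Int) else 0) := by
  unfold contribA
  by_cases h2 : (2:Int) ∣ z
  · obtain ⟨w, rfl⟩ := h2
    have hm : PySem.Int.mod (2 * w) 2 = 0 := (PySem.Int.mod_eq_zero_iff_dvd _ _).2 ⟨w, rfl⟩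
    have hd : PySem.Int.floordiv (2 * w) 2 = w := by
      rw [PySem.Int.floordiv_eq_ediv_of_pos (by norm_num)]
      omega
    rw [hm, hd, pairsI_append]
    have hiff : (2 * w = 2 * x) ↔ (x = w) := by constructor <;> intro h <;> omega
    by_cases hx : x = w
    · subst hx; simp
    · have : ¬ (2 * w = 2 * x) := by intro h; exact hx (hiff.1 h)
      simp [hx, this]
  · have hm : ¬ PySem.Int.mod z 2 = 0 := by
      intro h; exact h2 ((PySem.Int.mod_eq_zero_iff_dvd _ _).1 h)
    have hz : ¬ z = 2 * x := by intro h; exact h2 ⟨x, h⟩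
    simp [hz, h2]

lemma eSum_append (p : List Int) (x : Int) (s : List Int) :
    eSum (p ++ [x]) s = (p.count (2 * x) : Int) * (s.count (2 * x) : Int) + eSum p s := by
  induction s with
  | nil => simp [eSum]
  | cons z t ih =>
    simp only [eSum, ih, contribA_append, List.count_cons]
    split_ifs <;> simp_all <;> try ring

lemma eSum_nil_left (s : List Int) : eSum [] s = 0 := by
  induction s with
  | nil => rfl
  | cons z t ih =>
    have : contribA [] z = 0 := by unfold contribA pairsI; split_ifs <;> rfl
    simp [eSum, this, ih]

lemma aSum_eq (s : List Int) : ∀ p, aSum p s = midSum p s + eSum p s := by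
  induction s with
  | nil => intro p; simp [aSum, midSum, eSum]
  | cons x t ih =>
    intro p
    simp only [aSum, midSum, eSum, ih (p ++ [x]), eSum_append]
    ring

lemma mod_mod_add (a b : Int) :
    PySem.Int.mod (PySem.Int.mod a (10 ^ 9 + 7) + b) (10 ^ 9 + 7) = PySem.Int.mod (a + b) (10 ^ 9 + 7) := by
  rw [PySem.Int.mod_eq_emod_of_pos (by norm_num), PySem.Int.mod_eq_emod_of_pos (by norm_num),
      PySem.Int.mod_eq_emod_of_pos (by norm_num)]
  omega

lemma mod_self_of_bounds (a : Int) (h0 : 0 ≤ a) (h1 : a < 10 ^ 9 + 7) :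
    PySem.Int.mod a (10 ^ 9 + 7) = a := by
  rw [PySem.Int.mod_eq_emod_of_pos (by norm_num)]
  omega

-- invariants for A's dictionaries, stated through get?
def InvD1 (p : List Int) (d1 : PySem.Dict Int Int) : Prop :=
  ∀ v, d1.get? v = if p.count v = 0 then none else some (p.count v : Int)

def InvD2 (p : List Int) (d2 : PySem.Dict Int Int) : Prop :=
  ∀ v, d2.get? v = if pairsI p v = 0 then none else some (pairsI p v)

lemma invD1_getD {p : List Int} {d1 : PySem.Dict Int Int} (h : InvD1 p d1) (v : Int) :
    d1.getD v 0 = (p.count v : Int) := by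
  rw [PySem.Dict.getD_eq_get?_getD, h v]
  split_ifs with hc <;> simp [hc]

lemma invD2_getD {p : List Int} {d2 : PySem.Dict Int Int} (h : InvD2 p d2) (v : Int) :
    d2.getD v 0 = pairsI p v := by
  rw [PySem.Dict.getD_eq_get?_getD, h v]
  split_ifs with hc <;> simp [hc]

lemma stepA_res {p : List Int} {d1 d2 : PySem.Dict Int Int} {res : Int} (x : Int)
    (h2 : InvD2 p d2) (hr0 : 0 ≤ res) (hr1 : res < 10 ^ 9 + 7) :
    (specialTripletsStepA (d1, d2, res) x).2.2 = PySem.Int.mod (res + contribA p x) (10 ^ 9 + 7) := by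
  show (if PySem.Int.mod x 2 = 0 ∧ d2.contains (PySem.Int.floordiv x 2) = true then
          PySem.Int.mod (res + d2.getD (PySem.Int.floordiv x 2) 0) (10 ^ 9 + 7) else res)
        = PySem.Int.mod (res + contribA p x) (10 ^ 9 + 7)
  unfold contribA
  by_cases he : PySem.Int.mod x 2 = 0
  · by_cases hp : pairsI p (PySem.Int.floordiv x 2) = 0
    · have hcon : d2.contains (PySem.Int.floordiv x 2) = false := by
        rw [PySem.Dict.contains_eq_isSome_get?, h2, if_pos hp]; rfl
      rw [if_neg (by rw [hcon]; exact fun h => by simpa using h.2), if_pos he, hp, add_zero]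
      exact (mod_self_of_bounds res hr0 hr1).symm
    · have hcon : d2.contains (PySem.Int.floordiv x 2) = true := by
        rw [PySem.Dict.contains_eq_isSome_get?, h2, if_neg hp]; rfl
      rw [if_pos ⟨he, hcon⟩, if_pos he, invD2_getD h2]
  · rw [if_neg (fun h => he h.1), if_neg he, add_zero]
    exact (mod_self_of_bounds res hr0 hr1).symm

lemma stepA_d1 {p : List Int} {d1 d2 : PySem.Dict Int Int} {res : Int} (x : Int)
    (h1 : InvD1 p d1) : InvD1 (p ++ [x]) (specialTripletsStepA (d1, d2, res) x).1 := by
  intro v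
  show (if d1.contains x then d1.insert x (d1.getD x 0 + 1) else d1.insert x 1).get? v
      = if (p ++ [x]).count v = 0 then none else some ((p ++ [x]).count v : Int)
  have hins : (if d1.contains x then d1.insert x (d1.getD x 0 + 1) else d1.insert x 1)
      = d1.insert x ((p.count x : Int) + 1) := by
    rw [PySem.Dict.contains_eq_isSome_get?, h1 x, invD1_getD h1]
    by_cases hc : p.count x = 0
    · rw [if_pos hc]; simp [hc]
    · rw [if_neg hc]; simp
  rw [hins, count_append_singleton]
  by_cases hv : v = x
  · subst hv
    rw [PySem.Dict.get?_insert_self]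
    have hne : ¬ (p.count v + (if v = v then 1 else 0) = 0) := by simp
    rw [if_neg hne]
    simp
  · rw [PySem.Dict.get?_insert_of_ne _ _ hv, h1 v]
    simp [hv]

lemma stepA_d2 {p : List Int} {d1 d2 : PySem.Dict Int Int} {res : Int} (x : Int)
    (h1 : InvD1 p d1) (h2 : InvD2 p d2) :
    InvD2 (p ++ [x]) (specialTripletsStepA (d1, d2, res) x).2.1 := by
  intro v
  show (if d1.contains (x * 2) then
          (if d2.contains x then d2.insert x (d2.getD x 0 + d1.getD (x * 2) 0)
           else d2.insert x (d1.getD (x * 2) 0))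
        else d2).get? v
      = if pairsI (p ++ [x]) v = 0 then none else some (pairsI (p ++ [x]) v)
  rw [pairsI_append]
  by_cases hcnt : p.count (x * 2) = 0
  · have hc1 : d1.contains (x * 2) = false := by
      rw [PySem.Dict.contains_eq_isSome_get?, h1 (x * 2), if_pos hcnt]; rfl
    rw [hc1]
    simp only [Bool.false_eq_true, if_false]
    rw [h2 v]
    by_cases hv : x = v
    · subst hv
      have h0 : (p.count (2 * x) : Int) = 0 := by
        rw [show (2 * x : Int) = x * 2 by ring, hcnt]; rfl
      rw [if_pos rfl, h0, add_zero]
    · rw [if_neg hv, add_zero]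
  · have hc1 : d1.contains (x * 2) = true := by
      rw [PySem.Dict.contains_eq_isSome_get?, h1 (x * 2), if_neg hcnt]; rfl
    rw [hc1]
    simp only [if_true]
    have hins : (if d2.contains x then d2.insert x (d2.getD x 0 + d1.getD (x * 2) 0)
        else d2.insert x (d1.getD (x * 2) 0))
        = d2.insert x (pairsI p x + (p.count (x * 2) : Int)) := by
      rw [PySem.Dict.contains_eq_isSome_get?, h2 x, invD1_getD h1, invD2_getD h2]
      by_cases hp : pairsI p x = 0
      · rw [if_pos hp]; simp [hp]
      · rw [if_neg hp]; simp
    rw [hins]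
    by_cases hv : v = x
    · subst hv
      rw [PySem.Dict.get?_insert_self, if_pos rfl]
      have h2v : (2 * v : Int) = v * 2 := by ring
      have hp0 := pairsI_nonneg p v
      have hcpos : 0 < p.count (v * 2) := Nat.pos_of_ne_zero hcnt
      have hcposI : (0:Int) < (p.count (v * 2) : Int) := by exact_mod_cast hcpos
      have hne : ¬ (pairsI p v + (p.count (2 * v) : Int) = 0) := by rw [h2v]; omega
      rw [if_neg hne, h2v]
    · rw [PySem.Dict.get?_insert_of_ne _ _ hv, h2 v]
      have hxv : ¬ x = v := fun h => hv h.symm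
      simp [hxv]

-- A's loop invariant
lemma loopA (s : List Int) : ∀ (p : List Int) (d1 d2 : PySem.Dict Int Int) (res : Int),
    InvD1 p d1 → InvD2 p d2 → 0 ≤ res → res < 10 ^ 9 + 7 →
    (s.foldl specialTripletsStepA (d1, d2, res)).2.2
      = PySem.Int.mod (res + aSum p s) (10 ^ 9 + 7) := by
  induction s with
  | nil =>
    intro p d1 d2 res h1 h2 hr0 hr1
    simp only [List.foldl_nil, aSum, add_zero]
    exact (mod_self_of_bounds res hr0 hr1).symm
  | cons x t ih =>
    intro p d1 d2 res h1 h2 hr0 hr1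
    simp only [List.foldl_cons]
    have hst : specialTripletsStepA (d1, d2, res) x
        = ((specialTripletsStepA (d1, d2, res) x).1,
           (specialTripletsStepA (d1, d2, res) x).2.1,
           (specialTripletsStepA (d1, d2, res) x).2.2) := rfl
    rw [hst, stepA_res x h2 hr0 hr1]
    rw [ih (p ++ [x]) _ _ _ (stepA_d1 x h1) (stepA_d2 x h1 h2)
         (PySem.Int.mod_nonneg _ (by norm_num)) (PySem.Int.mod_lt _ (by norm_num))]
    rw [mod_mod_add]
    simp only [aSum]
    ring_nf

-- B's loop invariant
lemma loopB (s : List Int) : ∀ (p : List Int) (left right : PySem.Dict Int Int) (res : Int),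
    (∀ v, left.getD v 0 = (p.count v : Int)) →
    (∀ v, right.getD v 0 = (s.count v : Int)) →
    0 ≤ res → res < 10 ^ 9 + 7 →
    (s.foldl specialTripletsStepB (left, right, res)).2.2
      = PySem.Int.mod (res + midSum p s) (10 ^ 9 + 7) := by
  induction s with
  | nil =>
    intro p left right res hl hr hr0 hr1
    simp only [List.foldl_nil, midSum, add_zero]
    exact (mod_self_of_bounds res hr0 hr1).symm
  | cons x t ih =>
    intro p left right res hl hr hr0 hr1
    simp only [List.foldl_cons]
    have hright' : ∀ v, (right.insert x (right.getD x 0 - 1)).getD v 0 = (t.count v : Int) := by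
      intro v
      rw [PySem.Dict.getD_insert]
      by_cases hv : v = x
      · rw [if_pos hv, hr x, hv, List.count_cons_self]
        push_cast; ring
      · have hxv : ¬ x = v := fun hh => hv hh.symm
        rw [if_neg hv, hr v, List.count_cons]
        simp [hxv]
    have hleft' : ∀ v, (left.insert x (left.getD x 0 + 1)).getD v 0 = ((p ++ [x]).count v : Int) := by
      intro v
      rw [PySem.Dict.getD_insert, count_append_singleton]
      by_cases hv : v = x
      · rw [if_pos hv, hl x, hv]; simp
      · rw [if_neg hv, hl v]; simp [hv]
    have hst : specialTripletsStepB (left, right, res) x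
        = ((specialTripletsStepB (left, right, res) x).1,
           (specialTripletsStepB (left, right, res) x).2.1,
           (specialTripletsStepB (left, right, res) x).2.2) := rfl
    have hres' : (specialTripletsStepB (left, right, res) x).2.2
        = PySem.Int.mod (res + (p.count (2 * x) : Int) * (t.count (2 * x) : Int)) (10 ^ 9 + 7) := by
      show PySem.Int.mod (res + left.getD (2 * x) 0 * (right.insert x (right.getD x 0 - 1)).getD (2 * x) 0) (10 ^ 9 + 7) = _
      rw [hl, hright']
    have hL : (specialTripletsStepB (left, right, res) x).1 = left.insert x (left.getD x 0 + 1) := rfl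
    have hR : (specialTripletsStepB (left, right, res) x).2.1 = right.insert x (right.getD x 0 - 1) := rfl
    rw [hst, hres', hL, hR]
    rw [ih (p ++ [x]) _ _ _ hleft' hright'
         (PySem.Int.mod_nonneg _ (by norm_num)) (PySem.Int.mod_lt _ (by norm_num))]
    rw [mod_mod_add]
    simp only [midSum]
    ring_nf

lemma specialTriplets_eq (nums : List Int) :
    specialTriplets nums = PySem.Int.mod (aSum [] nums) (10 ^ 9 + 7) := by
  unfold specialTriplets
  rw [loopA nums [] _ _ _ (fun v => by simp [PySem.Dict.get?_empty])
        (fun v => by simp [PySem.Dict.get?_empty, pairsI]) le_rfl (by norm_num)]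
  simp

lemma specialTriplets_alt_eq (nums : List Int) :
    specialTriplets_alt nums = PySem.Int.mod (midSum [] nums) (10 ^ 9 + 7) := by
  unfold specialTriplets_alt
  simp only []
  rw [loopB nums [] _ _ _ (fun v => by simp [PySem.Dict.getD_empty])
        (fun v => by rw [PySem.Dict.getD_foldl_insert_add_one]; simp [PySem.Dict.getD_empty])
        le_rfl (by norm_num)]
  simp

-- ===== VERDICT (by name: the statement is the Claim_ definition above) =====
theorem specialTriplets_spec : Claim_equal_specialTriplets := by
  intro nums _
  unfold Spec_specialTriplets
  rw [specialTriplets_eq, specialTriplets_alt_eq, aSum_eq nums [], eSum_nil_left]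
  ring_nf
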